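/- GENERATED by tools/from_farm_form.py from prooffarm-gif/accepted/DGifGetRecordType.1/Lemmas.lean (a worked proof of the farm's unit `DGifGetRecordType.1`,
   accepted by the verdict) — do not edit. -/
import Gif.Spec.Units.DGifGetRecordType_1
import Gif.Spec.AllSegs

/-!
  Lemmas for the unit `DGifGetRecordType.1` (the BODY of a protected function: two checked loads, a reader call into the object
  `Buf` of the OWN frame, then a checked store into `gif.Error` on the error arm): the segment is walked in TWO STEPS that meet at
  the call's return address 0x108c20 (`ret4`), with a private assertion there.

      rt1_AtRet4       the assertion at `ret4`: `Body` + the registers and facts that are live THERE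
      rt1_seg_call     0x108bc9 … the checks … the call of InternalRead … 0x108c20: `Start` → `rt1_AtRet4`
      rt1_seg_tail     0x108c20 … 0x108c3e (`AfterRead`) or 0x108bf5 (`Done`): `rt1_AtRet4` → `Done ∨ AfterRead`

  The general lemmas are those of Gif/Spec/FrameCarry.lean §5 (`Env.at_call`, `store_stack`, `store_gif`) and
  Gif/Spec/Carry.lean §4 (`BufOK.own`).
-/

open X86 X86.User Asan ProgX.Base ProgX.Base.Spec Gif.Spec

set_option maxRecDepth 4000
set_option maxHeartbeats 4000000

namespace Gif.Spec.DGifGetRecordType_1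

/-- **At 108C20H (ret4), `InternalRead(gif, &Buf, 1)` has returned**: `Body`, `rbp = gif`, `eax = k ≤ 1` the bytes delivered, and
`k = 1` means the reader advanced by exactly 1. -/
structure rt1_AtRet4 (H : Heap) (rest : List Obj) (frames : List (Nat × FrameLayout)) (F : Forest) (R : Rd) (u₀ e : State)
    (ret : Word) (v : State) : Prop where
  body : DGifGetRecordType.Body Gif.L.DGifGetRecordType.ret4 H rest frames F R u₀ e ret v
  rbp : v.reg .rbp = e.reg .rdi
  count : (v.reg .rax).toNat ≤ 1
  adv : (v.reg .rax).toNat = 1 → rem R v.mem + 1 = rem R e.mem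

/-- **108BC9H … the two checked loads … the call of InternalRead … 108C20H (ret4)** (dgif_lib.c:327-336). The load of
`gif.Private` gives `F.pv` (`Shape.priv`), the load of `pv.FileState` gives 8 (`Shape.state`): the `NOT_READABLE` arm (l.331) is
dead. `edx = 1`, `rsi = &Buf = RA − 72` (the frame's object `Buf` at base + 32), `rdi = rbp = gif`. -/
theorem rt1_seg_call (Lay : Layout) (hLay : Lay.hi = 0x1000000) (μ : Microarch) (hμ : UserX.MicroOK μ) (u₀ : State)
    (hcode : HasCodeNat Lay u₀ Gif.L.DGifGetRecordType.entry Gif.Code.code_DGifGetRecordType.nat Gif.L.DGifGetRecordType.size)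
    (H : Heap) (rest : List Obj) (frames : List (Nat × FrameLayout)) (F : Forest) (R : Rd) (e : State) (ret : Word)
    (h_InternalRead : Calls Lay μ ProgX.Base.WayInv (ProgX.Base.conv u₀) Gif.L.InternalRead.entry
      (Gif.Spec.InternalRead.spec H rest (DGifGetRecordType.framesIn frames e) F R 1))
    (h_asan_load8_noabort : Asan.SmallCheck Lay μ ProgX.Base.WayInv (ProgX.Base.CodeOK u₀) [.rax, .rcx, .rdx] 8
      ProgX.Base.L.__asan_load8_noabort.entry)
    (h_asan_load4_noabort : Asan.SmallCheck Lay μ ProgX.Base.WayInv (ProgX.Base.CodeOK u₀) [.rax, .rcx, .rdx] 4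
      ProgX.Base.L.__asan_load4_noabort.entry)
    (v : State) (hat : DGifGetRecordType.Start H rest frames F R u₀ e ret v) :
    ReachVia Lay μ ProgX.Base.WayInv v (rt1_AtRet4 H rest frames F R u₀ e ret) := by
  -- THE PRELUDE: the entry assertion `Start` = `Body` + `rdi` + the reader did not move
  have hrem_eq := hat.rem_eq
  obtain ⟨hbody, c_rdi, _⟩ := hat
  have he := hbody.entry
  v_entry he
  obtain ⟨henv, hrdi, htype⟩ := hbody.pre
  -- what the walker reads of a segment's entry state: rip, rsp (as `c_rsp`), the registers kept, the text, DF / MXCSR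
  have w_rip := hbody.rip
  have c_rsp : v.reg .rsp = e.reg .rsp - 104 := hbody.rsp
  have c_rbp : v.reg .rbp = e.reg .rdi := hbody.rbp
  have w_kept : RegsKept [.rsp] v v := RegsKept.refl _ _
  have w_eq : Mem.EqOn ProgX.Base.L.textLo ProgX.Base.L.textHi u₀.mem v.mem := ProgX.Base.conv_code_eqOn hbody.code
  have hdf := (show abiInv _ from hbody.abi).1
  have hmx := (show abiInv _ from hbody.abi).2
  have hsse := ProgX.Base.sseOK_of_abiInv hbody.abi
  -- the slots and the footprint that `Body` at the exit states again
  have k_r13 : v.mem.readLE (e.reg .rsp - 8) 8 = (e.reg .r13).toNat := hbody.slot_r13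
  have k_r12 : v.mem.readLE (e.reg .rsp - 16) 8 = (e.reg .r12).toNat := hbody.slot_r12
  have k_rbp : v.mem.readLE (e.reg .rsp - 24) 8 = (e.reg .rbp).toNat := hbody.slot_rbp
  have k_rbx : v.mem.readLE (e.reg .rsp - 32) 8 = (e.reg .rbx).toNat := hbody.slot_rbx
  have k_ra : UInt64.ofNat (v.mem.readLE (e.reg .rsp) 8) = ret := hbody.slot_ra
  have hsame : Mem.SameExcept
    [⟨(e.reg .rsp).toNat - 288, (e.reg .rsp).toNat⟩,
     shadowSpan ((e.reg .rsp).toNat - 104) ((e.reg .rsp).toNat - 40),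
     ⟨(e.reg .rsi).toNat, (e.reg .rsi).toNat + 4⟩,
     ⟨F.gif + 96, F.gif + 100⟩,
     ⟨R.cur, R.cur + 8⟩] e.mem v.mem := hbody.same
  -- where the cursor, gif and pv are, as numbers (`v_side`, `u_same`, `u_omega` place every store with them)
  have hcur := henv.ctx.cursor_range henv.heap.inv.shadow
  have hgin := henv.ok.owns.inside henv.heap.inv.heap (o := (F.gif, 120)) List.mem_cons_self
  have hpin := henv.ok.owns.inside henv.heap.inv.heap (o := (F.pv, 24936)) (List.mem_cons_of_mem _ List.mem_cons_self)
  have hbase := henv.heap.base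
  simp only at hgin hpin
  rw [hbase] at hgin hpin
  -- the two loads, as facts about the memory at `v` in the walker's form
  have hpriv := hbody.ok.shape.priv
  have hstate := hbody.ok.shape.state
  simp only [gfield] at hpriv hstate
  have l_priv : v.mem.readLE (e.reg .rdi + 0x70) 8 = F.pv := by
    rw [rd_eq_readLE v.mem (e.reg .rdi + 0x70) (F.gif + 112) 8 (by u_omega)]
    exact hpriv
  have l_state : v.mem.readLE (UInt64.ofNat F.pv) 4 = 8 := by
    rw [rd_eq_readLE v.mem (UInt64.ofNat F.pv) F.pv 4 (by u_omega)]
    exact hstate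
  -- gif and pv are live under the body's frames: what the two check goals ask
  have hgl : LiveIn (H.liveObjs ++ rest) (DGifGetRecordType.framesIn frames e) F.gif 120 :=
    hbody.ok.gif_live.liveIn rest _ (Nat.le_refl _) (Nat.le_refl _)
  have hpl : LiveIn (H.liveObjs ++ rest) (DGifGetRecordType.framesIn frames e) F.pv 24936 :=
    hbody.ok.pv_live.liveIn rest _ (Nat.le_refl _) (Nat.le_refl _)
  -- THE WALK, to the call's return address
  u_walk hcode [hμ.vendor] until [Gif.L.DGifGetRecordType.ret4] span [ProgX.Base.L.textLo, ProgX.Base.L.textHi] side (v_side)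
  case check_108bcd =>
    -- dgif_lib.c:327 the load of `gif.Private`: 8 bytes inside gif
    have hun : ShadowUntouched v.mem s_108bcd.mem := by v_untouched
    exact hgl.accSmall hbody.inv.shadow hun _ 8 (by decide) (by u_omega) (by u_omega)
  case check_108bd9 =>
    -- dgif_lib.c:329 the load of `pv.FileState`: 4 bytes inside pv
    have hun : ShadowUntouched v.mem s_108bd9.mem := by v_untouched
    exact hpl.accSmall hbody.inv.shadow hun _ 4 (by decide) (by u_omega) (by u_omega)
  case call_inv =>
    v_inv
  case pre_108c1b =>
    -- INTERNALREAD'S PRECONDITION. The environment for the frame list with the own frame in front: only a return address was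
    -- pushed since `v`
    have hs : Mem.SameExcept [⟨(e.reg .rsp).toNat - 288, (e.reg .rsp).toNat - 104⟩] v.mem s_108c1b.mem := by
      rw [w_mem]
      u_same
    have henv' : Env H rest (DGifGetRecordType.framesIn frames e) F R s_108c1b := by
      refine henv.at_call hbody.inv hbody.ok hs (by omega) (by omega) ?_ ?_ ?_
      · rw [w_rsp]
        u_omega
      · rw [w_rsp]
        u_omega
      · rw [w_rsp]
        u_omega
    -- the buffer is the frame's object `Buf` (`[rsp + 0x20]` = base + 32, 1 byte), named by its numbers
    have ho : (⟨(e.reg .rsp).toNat - 104 + 32, 1, .stack⟩ : Obj) ∈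
        Gif.Frames.DGifGetRecordType.objsAt ((e.reg .rsp).toNat - 104) := List.mem_cons_self
    have hsz : Gif.Frames.DGifGetRecordType.size = 64 := rfl
    have hb : (e.reg .rsp).toNat - 104 + Gif.Frames.DGifGetRecordType.size ≤ (e.reg .rsp).toNat + 8 := by
      rw [hsz]
      omega
    have hbuf : BufOK H rest (DGifGetRecordType.framesIn frames e) F R (s_108c1b.reg .rsi).toNat 1 := by
      apply BufOK.own henv.heap henv.ctx hbody.inv hb ho
      · rw [w_rsi]
        u_omega
      · rw [w_rsi]
        u_omega
    -- the clauses: `Env`, `rdi = gif`, `edx = 1`, `1 ≤ 1`, `1 < 2 ^ 31`, `BufOK`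
    refine ⟨henv', ?_, ?_, by decide, by decide, hbuf⟩
    · rw [w_rdi]
      exact hrdi
    · rw [w_rdx]
      decide
  -- 0x108c20 (ret4): INTERNALREAD HAS RETURNED. Its post: `k` bytes delivered
  obtain ⟨k, hk1, hk2, hk3, hk4, hk5, hback⟩ :
    ReadPost H rest (DGifGetRecordType.framesIn frames e) F R 1 s_108c1b s_108c1br := w_post
  -- the reader at InternalRead's entry is the entry's: only the return address was pushed
  have hs0 : Mem.SameExcept [⟨(e.reg .rsp).toNat - 288, (e.reg .rsp).toNat - 104⟩] v.mem s_108c1b.mem := by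
    rw [w_mem_108c1b]
    u_same
  have hrem0 : rem R s_108c1b.mem = rem R e.mem := by
    rw [← hrem_eq]
    apply rem_sameExcept hs0 (by omega)
    intro w hw
    have e := List.mem_singleton.mp hw
    rw [e]
    simp only
    omega
  have e_top : (s_108c1b.reg .rsp).toNat + 8 = (e.reg .rsp).toNat - 104 := by
    rw [w_rsp_108c1b]
    u_omega
  -- the callee's footprint in terms of `v` (`w_same : SameExcept […] v.mem s_108c1br.mem`)
  v_after_call w_rsp_108c1b w_mem_108c1b
  simp only [w_rsi_108c1b] at w_same
  -- THE SLOTS AND THE RETURN ADDRESS, over the pushed return address (first step) and through InternalRead's footprint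
  -- (second step: the buffer `Buf`, the cursor, the stack below)
  have hp13 : s_108c1b.mem.readLE (e.reg .rsp - 8) 8 = (e.reg .r13).toNat := by
    rw [w_mem_108c1b]
    u_frame k_r13
  rw [w_mem_108c1b] at hp13
  have hs13 : s_108c1br.mem.readLE (e.reg .rsp - 8) 8 = (e.reg .r13).toNat := by u_frame hp13
  have hp12 : s_108c1b.mem.readLE (e.reg .rsp - 16) 8 = (e.reg .r12).toNat := by
    rw [w_mem_108c1b]
    u_frame k_r12
  rw [w_mem_108c1b] at hp12
  have hs12 : s_108c1br.mem.readLE (e.reg .rsp - 16) 8 = (e.reg .r12).toNat := by u_frame hp12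
  have hpbp : s_108c1b.mem.readLE (e.reg .rsp - 24) 8 = (e.reg .rbp).toNat := by
    rw [w_mem_108c1b]
    u_frame k_rbp
  rw [w_mem_108c1b] at hpbp
  have hsbp : s_108c1br.mem.readLE (e.reg .rsp - 24) 8 = (e.reg .rbp).toNat := by u_frame hpbp
  have hpbx : s_108c1b.mem.readLE (e.reg .rsp - 32) 8 = (e.reg .rbx).toNat := by
    rw [w_mem_108c1b]
    u_frame k_rbx
  rw [w_mem_108c1b] at hpbx
  have hsbx : s_108c1br.mem.readLE (e.reg .rsp - 32) 8 = (e.reg .rbx).toNat := by u_frame hpbx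
  have hpra : UInt64.ofNat (s_108c1b.mem.readLE (e.reg .rsp) 8) = ret := by
    rw [w_mem_108c1b]
    u_frame k_ra
  rw [w_mem_108c1b] at hpra
  have hsra : UInt64.ofNat (s_108c1br.mem.readLE (e.reg .rsp) 8) = ret := by u_frame hpra
  -- the footprint since the entry: InternalRead's windows lie inside the function's
  have hsame1 : Mem.SameExcept
    [⟨(e.reg .rsp).toNat - 288, (e.reg .rsp).toNat⟩,
     shadowSpan ((e.reg .rsp).toNat - 104) ((e.reg .rsp).toNat - 40),
     ⟨(e.reg .rsi).toNat, (e.reg .rsi).toNat + 4⟩,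
     ⟨F.gif + 96, F.gif + 100⟩,
     ⟨R.cur, R.cur + 8⟩] e.mem s_108c1br.mem := by u_same
  -- the heap's invariant comes back with the clean stack at the callee's `rsp + 8` = the body's `rsp`
  have hinv1 : HeapInv H rest (DGifGetRecordType.framesIn frames e) ((e.reg .rsp).toNat - 104) s_108c1br.mem := by
    rw [← e_top]
    exact hback.inv
  -- THE EXIT ASSERTION: `Body` at `ret4` …
  have hbody1 : DGifGetRecordType.Body Gif.L.DGifGetRecordType.ret4 H rest frames F R u₀ e ret s_108c1br := {
    entry := hbody.entry
    pre := hbody.pre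
    type_above := hbody.type_above
    rip := w_rip
    rsp := w_rsp
    rbp := (w_kept.get .rbp rfl).trans hbody.rbp
    r13 := (w_kept.get .r13 rfl).trans hbody.r13
    r12 := (w_kept.get .r12 rfl).trans hbody.r12
    r14 := (w_kept.get .r14 rfl).trans hbody.r14
    r15 := (w_kept.get .r15 rfl).trans hbody.r15
    slot_r13 := hs13
    slot_r12 := hs12
    slot_rbp := hsbp
    slot_rbx := hsbx
    slot_ra := hsra
    inv := hinv1
    ok := hback.ok
    rem := by
      rw [← hrem0]
      exact hback.rem
    same := hsame1
    code := w_code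
    abi := w_inv
  }
  -- … and what is live at `ret4`: gif in `rbp`, the count in `eax`
  refine ReachVia.done ?_
  exact {
    body := hbody1
    rbp := (w_kept.get .rbp rfl).trans c_rbp
    count := by
      rw [hk4]
      exact hk1
    adv := by
      intro h1
      rw [hk4] at h1
      rw [hk5, hrem0]
      rw [hrem0] at hk2
      omega
  }

/-- **108C20H (ret4) … 108C3EH or 108BF5H** (dgif_lib.c:336-338): `mov ebx, eax ; cmp eax, 1`; one byte: `AfterRead` at 108C3EH
with `rbx = 1`; fewer: the checked store of `gif.Error = 102`, `ebx = 0`, `Done` at 108BF5H. -/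
theorem rt1_seg_tail (Lay : Layout) (hLay : Lay.hi = 0x1000000) (μ : Microarch) (hμ : UserX.MicroOK μ) (u₀ : State)
    (hcode : HasCodeNat Lay u₀ Gif.L.DGifGetRecordType.entry Gif.Code.code_DGifGetRecordType.nat Gif.L.DGifGetRecordType.size)
    (H : Heap) (rest : List Obj) (frames : List (Nat × FrameLayout)) (F : Forest) (R : Rd) (e : State) (ret : Word)
    (h_asan_store4_noabort : Asan.SmallCheck Lay μ ProgX.Base.WayInv (ProgX.Base.CodeOK u₀) [.rax, .rcx, .rdx] 4
      ProgX.Base.L.__asan_store4_noabort.entry)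
    (v : State) (hat : rt1_AtRet4 H rest frames F R u₀ e ret v) :
    ReachVia Lay μ ProgX.Base.WayInv v
      (fun w => DGifGetRecordType.Done H rest frames F R u₀ e ret w ∨ DGifGetRecordType.AfterRead H rest frames F R u₀ e ret w) := by
  -- THE PRELUDE: the entry assertion, as in `rt1_seg_call`
  obtain ⟨hbody, c_rbp, hcount, hadv⟩ := hat
  have he := hbody.entry
  v_entry he
  obtain ⟨henv, hrdi, htype⟩ := hbody.pre
  have w_rip := hbody.rip
  have c_rsp : v.reg .rsp = e.reg .rsp - 104 := hbody.rsp
  -- `eax` as a variable `z` (the branch fact of `cmp eax, 1` speaks of it)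
  obtain ⟨z, c_rax⟩ : ∃ z, v.reg .rax = z := ⟨_, rfl⟩
  rw [c_rax] at hcount hadv
  have w_kept : RegsKept [.rsp] v v := RegsKept.refl _ _
  have w_eq : Mem.EqOn ProgX.Base.L.textLo ProgX.Base.L.textHi u₀.mem v.mem := ProgX.Base.conv_code_eqOn hbody.code
  have hdf := (show abiInv _ from hbody.abi).1
  have hmx := (show abiInv _ from hbody.abi).2
  have hsse := ProgX.Base.sseOK_of_abiInv hbody.abi
  have k_r13 : v.mem.readLE (e.reg .rsp - 8) 8 = (e.reg .r13).toNat := hbody.slot_r13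
  have k_r12 : v.mem.readLE (e.reg .rsp - 16) 8 = (e.reg .r12).toNat := hbody.slot_r12
  have k_rbp : v.mem.readLE (e.reg .rsp - 24) 8 = (e.reg .rbp).toNat := hbody.slot_rbp
  have k_rbx : v.mem.readLE (e.reg .rsp - 32) 8 = (e.reg .rbx).toNat := hbody.slot_rbx
  have k_ra : UInt64.ofNat (v.mem.readLE (e.reg .rsp) 8) = ret := hbody.slot_ra
  have hsame : Mem.SameExcept
    [⟨(e.reg .rsp).toNat - 288, (e.reg .rsp).toNat⟩,
     shadowSpan ((e.reg .rsp).toNat - 104) ((e.reg .rsp).toNat - 40),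
     ⟨(e.reg .rsi).toNat, (e.reg .rsi).toNat + 4⟩,
     ⟨F.gif + 96, F.gif + 100⟩,
     ⟨R.cur, R.cur + 8⟩] e.mem v.mem := hbody.same
  have hcur := henv.ctx.cursor_range henv.heap.inv.shadow
  have hgin := henv.ok.owns.inside henv.heap.inv.heap (o := (F.gif, 120)) List.mem_cons_self
  have hbase := henv.heap.base
  simp only at hgin
  rw [hbase] at hgin
  -- gif is live under the body's frames: what the check goal asks
  have hgl : LiveIn (H.liveObjs ++ rest) (DGifGetRecordType.framesIn frames e) F.gif 120 :=
    hbody.ok.gif_live.liveIn rest _ (Nat.le_refl _) (Nat.le_refl _)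
  -- THE WALK, both arms, to the two exits
  u_walk hcode [hμ.vendor] until [Gif.L.DGifGetRecordType.at_108c3e, Gif.L.DGifGetRecordType.at_108bf5]
    span [ProgX.Base.L.textLo, ProgX.Base.L.textHi] side (v_side)
  case check_108c2b =>
    -- dgif_lib.c:337 the store of `gif.Error`: 4 bytes inside gif
    have hun : ShadowUntouched v.mem s_108c2b.mem := by v_untouched
    exact hgl.accSmall hbody.inv.shadow hun _ 4 (by decide) (by u_omega) (by u_omega)
  · -- 0x108c3e FROM 0x108c25: one byte was read, `ebx = eax = 1`; nothing was stored since `v`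
    -- the branch fact of `cmp eax, 1 ; je`: `eax = 1`
    have e1 : (1 : Nat) % 2 ^ Width.w32.bits = 1 := by decide
    rw [e1] at hbr_108c25
    have hz : z.toNat = 1 := by
      rw [toNat_part32] at hbr_108c25
      omega
    -- THE EXIT ASSERTION: `Body` at 0x108c3e …
    have hbody1 : DGifGetRecordType.Body Gif.L.DGifGetRecordType.at_108c3e H rest frames F R u₀ e ret s_108c25 := {
      entry := hbody.entry
      pre := hbody.pre
      type_above := hbody.type_above
      rip := w_rip
      rsp := w_rsp
      rbp := (w_kept.get .rbp rfl).trans hbody.rbp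
      r13 := (w_kept.get .r13 rfl).trans hbody.r13
      r12 := (w_kept.get .r12 rfl).trans hbody.r12
      r14 := (w_kept.get .r14 rfl).trans hbody.r14
      r15 := (w_kept.get .r15 rfl).trans hbody.r15
      slot_r13 := by
        rw [w_mem]
        exact k_r13
      slot_r12 := by
        rw [w_mem]
        exact k_r12
      slot_rbp := by
        rw [w_mem]
        exact k_rbp
      slot_rbx := by
        rw [w_mem]
        exact k_rbx
      slot_ra := by
        rw [w_mem]
        exact k_ra
      inv := by
        rw [w_mem]
        exact hbody.inv
      ok := by
        rw [w_mem]
        exact hbody.ok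
      rem := by
        rw [w_mem]
        exact hbody.rem
      same := by
        rw [w_mem]
        exact hsame
      code := ProgX.Base.conv_code_in w_eq
      abi := by
        refine ProgX.Base.abiInv_of ?_ ?_
        · rw [w_flags]
          simp only [X86.User.df_setStatus]
          exact hdf
        · rw [w_mxcsr]
          exact hmx
    }
    -- … and the results: `rbx = 1`, exactly one byte consumed
    refine ReachVia.done (Or.inr ?_)
    exact {
      body := hbody1
      rbx := by
        rw [w_rbx, toNat_ofBV32]
        exact hbr_108c25
      rem_eq := by
        rw [w_mem]
        exact hadv hz
    }
  · -- 0x108bf5 FROM 0x108c3c: no byte, `gif.Error = D_GIF_ERR_READ_FAILED` stored, ebx = 0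
    -- the two stores since `v`: the check call's return address (stack), then `gif.Error`
    obtain ⟨hinvA, hokA, hremA⟩ := store_stack hbody.inv hbody.ok ⟨hcur.1, hcur.2.1⟩ (e.reg .rsp - 112) 8 1084464
      (by u_omega) (by u_omega)
    obtain ⟨hinvB, hokB, hremB⟩ := store_gif hinvA hokA ⟨hcur.1, hcur.2.1⟩ hbase (e.reg .rdi + 96) 4 102
      (Or.inr (Or.inr (by u_omega)))
    rw [← w_mem] at hinvB hokB hremB
    have hremF : rem R s_108c3c.mem = rem R v.mem := hremB.trans hremA
    -- THE EXIT ASSERTION: `Body` at 0x108bf5 …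
    have hbody1 : DGifGetRecordType.Body Gif.L.DGifGetRecordType.at_108bf5 H rest frames F R u₀ e ret s_108c3c := {
      entry := hbody.entry
      pre := hbody.pre
      type_above := hbody.type_above
      rip := w_rip
      rsp := w_rsp
      rbp := (w_kept.get .rbp rfl).trans hbody.rbp
      r13 := (w_kept.get .r13 rfl).trans hbody.r13
      r12 := (w_kept.get .r12 rfl).trans hbody.r12
      r14 := (w_kept.get .r14 rfl).trans hbody.r14
      r15 := (w_kept.get .r15 rfl).trans hbody.r15
      slot_r13 := by
        rw [w_mem]
        u_frame k_r13
      slot_r12 := by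
        rw [w_mem]
        u_frame k_r12
      slot_rbp := by
        rw [w_mem]
        u_frame k_rbp
      slot_rbx := by
        rw [w_mem]
        u_frame k_rbx
      slot_ra := by
        rw [w_mem]
        u_frame k_ra
      inv := hinvB
      ok := hokB
      rem := by
        rw [hremF]
        exact hbody.rem
      same := by
        rw [w_mem]
        u_same
      code := ProgX.Base.conv_code_in w_eq
      abi := by
        refine ProgX.Base.abiInv_of ?_ ?_
        · rw [w_flags]
          exact w_df_108c2b
        · rw [w_mxcsr]
          exact hmx
    }
    -- … and the results: GIF_ERROR
    refine ReachVia.done (Or.inl ?_)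
    exact {
      body := hbody1
      res := by
        right
        rw [w_rbx]
        decide
      ok1 := by
        intro h1
        rw [w_rbx] at h1
        exact absurd h1 (by decide)
    }

end Gif.Spec.DGifGetRecordType_1
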